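-- pv_equiv track=rewrite | github.com/hamidreza004/MIR | main.py | wide_table
-- ===== SOURCE A (Python) =====
-- def wide_table(my_list, number_of_rows):
--     h = len(my_list) * number_of_rows
--     w = (len(my_list[0]) + number_of_rows - 1) // number_of_rows
--     res = [["" for _ in range(w)] for _ in range(h)]
--     for i in range(len(my_list)):
--         for j in range(len(my_list[0])):
--             res[(j % number_of_rows) * len(my_list) + i][j // number_of_rows] = my_list[i][j]
--     return res
-- ===== SOURCE B (Python) =====
-- def wide_table(my_list, number_of_rows):
--     L = len(my_list)
--     w0 = len(my_list[0])
--     h = L * number_of_rows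
--     w = (w0 + number_of_rows - 1) // number_of_rows
--     return [[my_list[r % L][c * number_of_rows + r // L]
--              if c * number_of_rows + r // L < w0 else ""
--              for c in range(w)]
--             for r in range(h)]
-- ===== Notes on version B (the rewrite author's own statement) =====
-- stated objective: alternative
-- what changed: Replaces the pre-filled grid plus scatter-assignment loops by a direct gather: each output cell (r,c) is computed from the inverted index formula i=r%L, j=c*number_of_rows+r//L, so no mutable grid or in-place writes are needed.
import Mathlib
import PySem

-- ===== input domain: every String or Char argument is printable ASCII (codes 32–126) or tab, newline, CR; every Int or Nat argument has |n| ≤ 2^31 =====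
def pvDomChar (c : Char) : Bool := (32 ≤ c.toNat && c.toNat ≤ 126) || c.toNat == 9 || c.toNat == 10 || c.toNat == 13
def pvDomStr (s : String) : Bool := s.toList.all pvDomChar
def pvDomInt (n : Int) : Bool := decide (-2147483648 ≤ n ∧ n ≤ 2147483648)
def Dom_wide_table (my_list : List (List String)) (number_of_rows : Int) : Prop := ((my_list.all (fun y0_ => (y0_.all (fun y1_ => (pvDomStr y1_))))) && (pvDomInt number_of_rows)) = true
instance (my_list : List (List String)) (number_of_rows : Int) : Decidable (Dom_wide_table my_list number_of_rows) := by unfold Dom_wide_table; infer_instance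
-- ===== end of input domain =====

-- B replaces A's pre-filled grid plus in-place scatter writes by a direct gather that computes each
-- output cell from the inverted index formula (alternative decomposition; return value only —
-- neither program mutates its arguments).


-- ===== PORT A =====
def wide_table (my_list : List (List String)) (number_of_rows : Int) : List (List String) :=
  let h : Int := (my_list.length : Int) * number_of_rows
  let w : Int := PySem.Int.floordiv (((PySem.List.pyGetD my_list 0 []).length : Int) + number_of_rows - 1) number_of_rows
  let res := (PySem.List.pyRange 0 h 1).map (fun _ => (PySem.List.pyRange 0 w 1).map (fun _ => ("" : String)))
  List.foldl (fun res (i : Nat) =>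
    List.foldl (fun res (j : Nat) =>
      PySem.List.pySetD res (PySem.Int.mod (j : Int) number_of_rows * (my_list.length : Int) + (i : Int))
        (PySem.List.pySetD
          (PySem.List.pyGetD res (PySem.Int.mod (j : Int) number_of_rows * (my_list.length : Int) + (i : Int)) [])
          (PySem.Int.floordiv (j : Int) number_of_rows)
          (PySem.List.pyGetD (PySem.List.pyGetD my_list (i : Int) []) (j : Int) "")))
      res (List.range (PySem.List.pyGetD my_list 0 []).length))
    res (List.range my_list.length)

-- ===== PORT B =====
def wide_table_alt (my_list : List (List String)) (number_of_rows : Int) : List (List String) :=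
  let L : Int := (my_list.length : Int)
  let w0 : Int := ((PySem.List.pyGetD my_list 0 []).length : Int)
  let h : Int := L * number_of_rows
  let w : Int := PySem.Int.floordiv (w0 + number_of_rows - 1) number_of_rows
  (PySem.List.pyRange 0 h 1).map (fun r =>
    (PySem.List.pyRange 0 w 1).map (fun c =>
      let j : Int := c * number_of_rows + PySem.Int.floordiv r L
      if j < w0 then
        PySem.List.pyGetD (PySem.List.pyGetD my_list (PySem.Int.mod r L) []) j ""
      else ""))

-- ===== PRECONDITION & SPEC =====
-- Pre_ is exactly the set of inputs where Python A returns: nonempty my_list and either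
-- number_of_rows ≥ 1 with every row at least as long as the first (else IndexError), or
-- number_of_rows ≤ -1 with an empty first row (then both loops are empty and A returns []);
-- number_of_rows = 0 raises ZeroDivisionError.
def Pre_wide_table (my_list : List (List String)) (number_of_rows : Int) : Prop :=
  my_list ≠ [] ∧
    ((1 ≤ number_of_rows ∧ ∀ row ∈ my_list, (my_list.headD []).length ≤ row.length) ∨
     (number_of_rows ≤ -1 ∧ (my_list.headD []).length = 0))
instance (my_list : List (List String)) (number_of_rows : Int) : Decidable (Pre_wide_table my_list number_of_rows) := by unfold Pre_wide_table; infer_instance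

def pvWitness_wide_table : List (List String) × Int := ([["a", "b", "c"], ["d", "e", "f"]], 2)

def Spec_wide_table (my_list : List (List String)) (number_of_rows : Int) (out : List (List String)) : Prop := out = wide_table_alt my_list number_of_rows
instance (my_list : List (List String)) (number_of_rows : Int) (out : List (List String)) : Decidable (Spec_wide_table my_list number_of_rows out) := by unfold Spec_wide_table; infer_instance

-- ===== CLAIM (what is proved, stated in full; the proofs are below) =====
def Claim_equal_wide_table : Prop := ∀ (my_list : List (List String)) (number_of_rows : Int), Dom_wide_table my_list number_of_rows → Pre_wide_table my_list number_of_rows → Spec_wide_table my_list number_of_rows (wide_table my_list number_of_rows)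

-- ===== LEMMAS AND PROOFS =====

-- cell (i, j) of the input, read with defaults (always in range under Pre_)
def pvCell (ml : List (List String)) (i j : Nat) : String := (ml.getD i []).getD j ""
-- cell (r, c) of a grid, read with defaults
def pvGet2 (g : List (List String)) (r c : Nat) : String := (g.getD r []).getD c ""

-- the body of A's inner loop as a named function
def pvStep (ml : List (List String)) (n : Int) (i j : Nat) (g : List (List String)) : List (List String) :=
  PySem.List.pySetD g (PySem.Int.mod (j : Int) n * (ml.length : Int) + (i : Int))
    (PySem.List.pySetD
      (PySem.List.pyGetD g (PySem.Int.mod (j : Int) n * (ml.length : Int) + (i : Int)) [])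
      (PySem.Int.floordiv (j : Int) n)
      (PySem.List.pyGetD (PySem.List.pyGetD ml (i : Int) []) (j : Int) ""))

lemma pvMod_cast (n : Int) (hn : 0 < n) (j : Nat) :
    PySem.Int.mod (j : Int) n = ((j % n.toNat : Nat) : Int) := by
  rw [PySem.Int.mod_eq_emod_of_pos hn, Int.natCast_mod, Int.toNat_of_nonneg (le_of_lt hn)]

lemma pvDiv_cast (n : Int) (hn : 0 < n) (j : Nat) :
    PySem.Int.floordiv (j : Int) n = ((j / n.toNat : Nat) : Int) := by
  rw [PySem.Int.floordiv_eq_ediv_of_pos hn, Int.natCast_div, Int.toNat_of_nonneg (le_of_lt hn)]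

lemma pvStep_eq (ml : List (List String)) (n : Int) (hn : 0 < n) (i j : Nat) (g : List (List String)) :
    pvStep ml n i j g =
      g.set (j % n.toNat * ml.length + i)
        ((g.getD (j % n.toNat * ml.length + i) []).set (j / n.toNat) (pvCell ml i j)) := by
  have hidx : PySem.Int.mod (j : Int) n * (ml.length : Int) + (i : Int)
      = ((j % n.toNat * ml.length + i : Nat) : Int) := by
    rw [pvMod_cast n hn j]; push_cast; ring
  unfold pvStep
  rw [hidx, pvDiv_cast n hn j]
  simp only [PySem.List.pySetD_natCast, PySem.List.pyGetD_natCast, pvCell]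

lemma pvGet2_set (g : List (List String)) (R C : Nat) (v : String)
    (hR : R < g.length) (hC : C < (g.getD R []).length) (r c : Nat) :
    pvGet2 (g.set R ((g.getD R []).set C v)) r c = if r = R ∧ c = C then v else pvGet2 g r c := by
  unfold pvGet2
  simp only [List.getD_eq_getElem?_getD]
  by_cases hr : r = R
  · subst hr
    rw [List.getElem?_set_self (by simpa using hR)]
    by_cases hc : c = C
    · subst hc
      have hC' : c < (g[r]?.getD []).length := by
        rw [← List.getD_eq_getElem?_getD]; exact hC
      simp [List.getElem?_set_self (by simpa using hC')]
    · simp only [Option.getD_some, List.getElem?_set_ne (by omega : C ≠ c)]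
      simp [hc]
  · rw [List.getElem?_set_ne (by omega : R ≠ r)]
    simp [hr]

lemma pvShape_set (g : List (List String)) (R C : Nat) (v : String) (W : Nat)
    (hrow : ∀ row ∈ g, row.length = W) (hR : R < g.length) :
    ∀ row ∈ g.set R ((g.getD R []).set C v), row.length = W := by
  intro row hmem
  rcases List.mem_or_eq_of_mem_set hmem with h | h
  · exact hrow _ h
  · subst h
    simp only [List.length_set]
    rw [List.getD_eq_getElem g [] hR]
    exact hrow _ (List.getElem_mem hR)

lemma pvDecode (L N i r c j0 : Nat) (hL : i < L) (hr : r < L * N) :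
    (r = j0 % N * L + i ∧ c = j0 / N) ↔ (r % L = i ∧ c * N + r / L = j0) := by
  have hL0 : 0 < L := by omega
  have hN0 : 0 < N := by
    rcases Nat.eq_zero_or_pos N with h | h
    · subst h; omega
    · exact h
  constructor
  · rintro ⟨rfl, rfl⟩
    have h1 : (j0 % N * L + i) % L = i := by
      rw [add_comm, Nat.add_mul_mod_self_right, Nat.mod_eq_of_lt hL]
    have h2 : (j0 % N * L + i) / L = j0 % N := by
      rw [mul_comm (j0 % N) L, Nat.mul_add_div hL0, Nat.div_eq_of_lt hL, Nat.add_zero]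
    refine ⟨h1, ?_⟩
    rw [h2, mul_comm (j0 / N) N]
    exact Nat.div_add_mod j0 N
  · rintro ⟨hi, hj⟩
    have hrN : r / L < N := (Nat.div_lt_iff_lt_mul hL0).mpr (by rw [mul_comm]; exact hr)
    have hm : j0 % N = r / L := by
      rw [← hj, add_comm, Nat.add_mul_mod_self_right, Nat.mod_eq_of_lt hrN]
    have hd : j0 / N = c := by
      rw [← hj, mul_comm c N, Nat.mul_add_div hN0, Nat.div_eq_of_lt hrN, Nat.add_zero]
    constructor
    · rw [hm, ← hi, mul_comm (r / L) L]
      exact (Nat.div_add_mod r L).symm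
    · exact hd.symm

lemma pv_inner (ml : List (List String)) (n : Int) (hn : 0 < n) (i : Nat) (hi : i < ml.length)
    (W j0 : Nat) (hjW : ∀ j < j0, j / n.toNat < W)
    (g : List (List String)) (hlen : g.length = ml.length * n.toNat)
    (hrow : ∀ row ∈ g, row.length = W) :
    (List.foldl (fun g j => pvStep ml n i j g) g (List.range j0)).length = ml.length * n.toNat ∧
    (∀ row ∈ List.foldl (fun g j => pvStep ml n i j g) g (List.range j0), row.length = W) ∧
    ∀ r c, r < ml.length * n.toNat → c < W →
      pvGet2 (List.foldl (fun g j => pvStep ml n i j g) g (List.range j0)) r c =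
        if r % ml.length = i ∧ c * n.toNat + r / ml.length < j0
        then pvCell ml i (c * n.toNat + r / ml.length) else pvGet2 g r c := by
  have hN0 : 0 < n.toNat := by omega
  have hL0 : 0 < ml.length := by omega
  induction j0 with
  | zero =>
    simp only [List.range_zero, List.foldl_nil]
    refine ⟨hlen, hrow, ?_⟩
    intro r c _ _
    simp
  | succ j0 ih =>
    obtain ⟨ihlen, ihrow, ihget⟩ := ih (fun j hj => hjW j (by omega))
    set G := List.foldl (fun g j => pvStep ml n i j g) g (List.range j0) with hG
    rw [List.range_succ, List.foldl_append, List.foldl_cons, List.foldl_nil, ← hG]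
    rw [pvStep_eq ml n hn i j0 G]
    set R := j0 % n.toNat * ml.length + i with hR
    set C := j0 / n.toNat with hC
    have hRlt : R < G.length := by
      rw [ihlen, hR]
      have h1 : j0 % n.toNat + 1 ≤ n.toNat := Nat.mod_lt _ hN0
      calc j0 % n.toNat * ml.length + i < j0 % n.toNat * ml.length + ml.length := by omega
        _ = (j0 % n.toNat + 1) * ml.length := by ring
        _ ≤ n.toNat * ml.length := Nat.mul_le_mul_right _ h1
        _ = ml.length * n.toNat := mul_comm _ _
    have hClt : C < (G.getD R []).length := by
      rw [List.getD_eq_getElem G [] hRlt, ihrow _ (List.getElem_mem hRlt)]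
      exact hjW j0 (by omega)
    refine ⟨by simp [ihlen], pvShape_set G R C _ W ihrow hRlt, ?_⟩
    intro r c hr hc
    rw [pvGet2_set G R C _ hRlt hClt r c, ihget r c hr hc]
    have hdec := pvDecode ml.length n.toNat i r c j0 hi hr
    rw [hR, hC] at *
    by_cases h1 : r = j0 % n.toNat * ml.length + i ∧ c = j0 / n.toNat
    · have h2 := hdec.mp h1
      rw [if_pos h1, if_pos (by omega : r % ml.length = i ∧ c * n.toNat + r / ml.length < j0 + 1)]
      rw [h2.2]
    · rw [if_neg h1]
      by_cases h3 : r % ml.length = i ∧ c * n.toNat + r / ml.length < j0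
      · rw [if_pos h3, if_pos (by omega : r % ml.length = i ∧ c * n.toNat + r / ml.length < j0 + 1)]
      · rw [if_neg h3, if_neg ?_]
        intro h4
        have h5 : r % ml.length = i ∧ c * n.toNat + r / ml.length = j0 := by
          rcases h4 with ⟨h4a, h4b⟩
          exact ⟨h4a, by omega⟩
        exact h1 (hdec.mpr h5)

lemma pv_outer (ml : List (List String)) (n : Int) (hn : 0 < n) (hL0 : 0 < ml.length)
    (W : Nat) (hjW : ∀ j < (ml.getD 0 []).length, j / n.toNat < W)
    (i0 : Nat) (hi0 : i0 ≤ ml.length)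
    (g : List (List String)) (hlen : g.length = ml.length * n.toNat)
    (hrow : ∀ row ∈ g, row.length = W)
    (hcells : ∀ r c, r < ml.length * n.toNat → c < W → pvGet2 g r c = "") :
    (List.foldl (fun g i => List.foldl (fun g j => pvStep ml n i j g) g
        (List.range (ml.getD 0 []).length)) g (List.range i0)).length = ml.length * n.toNat ∧
    (∀ row ∈ List.foldl (fun g i => List.foldl (fun g j => pvStep ml n i j g) g
        (List.range (ml.getD 0 []).length)) g (List.range i0), row.length = W) ∧
    ∀ r c, r < ml.length * n.toNat → c < W →
      pvGet2 (List.foldl (fun g i => List.foldl (fun g j => pvStep ml n i j g) g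
        (List.range (ml.getD 0 []).length)) g (List.range i0)) r c =
        if r % ml.length < i0 ∧ c * n.toNat + r / ml.length < (ml.getD 0 []).length
        then pvCell ml (r % ml.length) (c * n.toNat + r / ml.length) else "" := by
  induction i0 with
  | zero =>
    simp only [List.range_zero, List.foldl_nil]
    refine ⟨hlen, hrow, ?_⟩
    intro r c hr hc
    rw [hcells r c hr hc]
    simp
  | succ i0 ih =>
    obtain ⟨ihlen, ihrow, ihget⟩ := ih (by omega)
    set G := List.foldl (fun g i => List.foldl (fun g j => pvStep ml n i j g) g
        (List.range (ml.getD 0 []).length)) g (List.range i0) with hG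
    rw [List.range_succ, List.foldl_append, List.foldl_cons, List.foldl_nil, ← hG]
    obtain ⟨slen, srow, sget⟩ := pv_inner ml n hn i0 (by omega) W (ml.getD 0 []).length
      (fun j hj => hjW j hj) G ihlen ihrow
    refine ⟨slen, srow, ?_⟩
    intro r c hr hc
    rw [sget r c hr hc, ihget r c hr hc]
    by_cases h1 : r % ml.length = i0 ∧ c * n.toNat + r / ml.length < (ml.getD 0 []).length
    · rw [if_pos h1, if_pos (by omega : r % ml.length < i0 + 1 ∧ c * n.toNat + r / ml.length < (ml.getD 0 []).length)]
      rw [h1.1]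
    · rw [if_neg h1]
      by_cases h2 : r % ml.length < i0 ∧ c * n.toNat + r / ml.length < (ml.getD 0 []).length
      · rw [if_pos h2, if_pos (by omega : r % ml.length < i0 + 1 ∧ c * n.toNat + r / ml.length < (ml.getD 0 []).length)]
      · rw [if_neg h2, if_neg (by omega : ¬(r % ml.length < i0 + 1 ∧ c * n.toNat + r / ml.length < (ml.getD 0 []).length))]



lemma pvGetD_empty_row (xs : List Int) (c : Nat) :
    ((xs.map (fun _ => ("" : String))).getD c "") = "" := by
  simp only [List.getD_eq_getElem?_getD, List.getElem?_map]
  cases xs[c]? <;> simp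

lemma pv_main_pos (ml : List (List String)) (N : Nat) (hml : ml ≠ []) (hN0 : 0 < N) :
    wide_table ml (N : Int) = wide_table_alt ml (N : Int) := by
  have hL0 : 0 < ml.length := List.length_pos_iff.mpr hml
  have hpg : PySem.List.pyGetD ml (0 : Int) [] = ml.getD 0 [] := PySem.List.pyGetD_zero ml []
  have hn0 : (0 : Int) < (N : Int) := by exact_mod_cast hN0
  have hh : ((ml.length : Int) * (N : Int)) = ((ml.length * N : Nat) : Int) := by push_cast; ring
  have hw : PySem.Int.floordiv (((ml.getD 0 []).length : Int) + (N : Int) - 1) (N : Int)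
      = (((((ml.getD 0 []).length + N - 1) / N : Nat)) : Int) := by
    have h1 : (((ml.getD 0 []).length : Int) + (N : Int) - 1)
        = (((ml.getD 0 []).length + N - 1 : Nat) : Int) := by
      push_cast [Nat.cast_sub (by omega : 1 ≤ (ml.getD 0 []).length + N)]; ring
    rw [h1, PySem.Int.floordiv_natCast]
  have hjW : ∀ j, j < (ml.getD 0 []).length →
      j / N < ((ml.getD 0 []).length + N - 1) / N := by
    intro j hj
    have h1 : j / N ≤ ((ml.getD 0 []).length - 1) / N := Nat.div_le_div_right (by omega)
    have h2 : ((ml.getD 0 []).length - 1 + N) / N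
        = ((ml.getD 0 []).length - 1) / N + 1 := Nat.add_div_right _ hN0
    have h3 : ((ml.getD 0 []).length - 1 + N) = ((ml.getD 0 []).length + N - 1) := by omega
    rw [h3] at h2
    omega
  have hG0len : ((PySem.List.pyRange 0 ((ml.length * N : Nat) : Int) 1).map
      (fun _ => (PySem.List.pyRange 0 ((((ml.getD 0 []).length + N - 1) / N : Nat) : Int) 1).map
        (fun _ => ("" : String)))).length = ml.length * N := by
    rw [List.length_map, PySem.List.length_pyRange_one, Int.sub_zero, Int.toNat_natCast]
  have hG0row : ∀ row ∈ ((PySem.List.pyRange 0 ((ml.length * N : Nat) : Int) 1).map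
      (fun _ => (PySem.List.pyRange 0 ((((ml.getD 0 []).length + N - 1) / N : Nat) : Int) 1).map
        (fun _ => ("" : String)))), row.length = ((ml.getD 0 []).length + N - 1) / N := by
    intro row hmem
    rcases List.mem_map.mp hmem with ⟨_, _, rfl⟩
    rw [List.length_map, PySem.List.length_pyRange_one, Int.sub_zero, Int.toNat_natCast]
  have hG0cell : ∀ r c, r < ml.length * N → c < ((ml.getD 0 []).length + N - 1) / N →
      pvGet2 ((PySem.List.pyRange 0 ((ml.length * N : Nat) : Int) 1).map
        (fun _ => (PySem.List.pyRange 0 ((((ml.getD 0 []).length + N - 1) / N : Nat) : Int) 1).map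
          (fun _ => ("" : String)))) r c = "" := by
    intro r c _ _
    unfold pvGet2
    simp only [List.getD_eq_getElem?_getD, List.getElem?_map]
    cases (PySem.List.pyRange 0 ((ml.length * N : Nat) : Int) 1)[r]? with
    | none => simp
    | some _ =>
      simp only [Option.map_some, Option.getD_some]
      have := pvGetD_empty_row
        (PySem.List.pyRange 0 ((((ml.getD 0 []).length + N - 1) / N : Nat) : Int) 1) c
      simpa [List.getD_eq_getElem?_getD] using this
  obtain ⟨flen, frow, fget⟩ :=
    pv_outer ml (N : Int) hn0 hL0 (((ml.getD 0 []).length + N - 1) / N)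
      (by simpa [Int.toNat_natCast] using hjW) ml.length (le_refl ml.length)
      _ hG0len hG0row hG0cell
  simp only [Int.toNat_natCast] at flen frow fget
  simp only [wide_table, wide_table_alt]
  rw [hpg, hh, hw]
  show List.foldl (fun g i => List.foldl (fun g j => pvStep ml (N : Int) i j g) g
      (List.range (ml.getD 0 []).length)) _ (List.range ml.length) = _
  apply List.ext_getElem
  · rw [flen, List.length_map, PySem.List.length_pyRange_one, Int.sub_zero, Int.toNat_natCast]
  · intro r hr1 hr2
    have hrLN : r < ml.length * N := by rwa [flen] at hr1
    have hrowr := List.getElem_mem hr1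
    apply List.ext_getElem
    · rw [frow _ hrowr, List.getElem_map, List.length_map, PySem.List.length_pyRange_one,
        Int.sub_zero, Int.toNat_natCast]
    · intro c hc1 hc2
      have hcW : c < ((ml.getD 0 []).length + N - 1) / N := by rwa [frow _ hrowr] at hc1
      have hcell := fget r c hrLN hcW
      unfold pvGet2 at hcell
      rw [List.getD_eq_getElem _ [] hr1, List.getD_eq_getElem _ "" hc1] at hcell
      rw [hcell]
      simp only [List.getElem_map, PySem.List.getElem_pyRange_one, Int.zero_add]
      have hdivr : PySem.Int.floordiv (r : Int) ((ml.length : Nat) : Int) = ((r / ml.length : Nat) : Int) := by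
        have := pvDiv_cast ((ml.length : Nat) : Int) (by exact_mod_cast hL0) r
        simpa using this
      have hmodr : PySem.Int.mod (r : Int) ((ml.length : Nat) : Int) = ((r % ml.length : Nat) : Int) := by
        have := pvMod_cast ((ml.length : Nat) : Int) (by exact_mod_cast hL0) r
        simpa using this
      have hj : ((c : Int) * (N : Int) + PySem.Int.floordiv (r : Int) ((ml.length : Nat) : Int))
          = ((c * N + r / ml.length : Nat) : Int) := by
        rw [hdivr]; push_cast; ring
      rw [hj, hmodr]
      simp only [Nat.cast_lt, PySem.List.pyGetD_natCast]
      have hiL : r % ml.length < ml.length := Nat.mod_lt _ hL0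
      by_cases hcond : c * N + r / ml.length < (ml.getD 0 []).length
      · rw [if_pos ⟨hiL, hcond⟩, if_pos hcond]
        simp [pvCell]
      · rw [if_neg (by omega : ¬(r % ml.length < ml.length ∧
            c * N + r / ml.length < (ml.getD 0 []).length)), if_neg hcond]

lemma pv_main (ml : List (List String)) (n : Int) (hml : ml ≠ [])
    (hpre : (1 ≤ n ∧ ∀ row ∈ ml, (ml.headD []).length ≤ row.length) ∨
            (n ≤ -1 ∧ (ml.headD []).length = 0)) :
    wide_table ml n = wide_table_alt ml n := by
  rcases hpre with ⟨hn, _⟩ | ⟨hn, hW0⟩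
  · obtain ⟨N, rfl⟩ : ∃ N : Nat, n = (N : Int) := ⟨n.toNat, (Int.toNat_of_nonneg (by omega)).symm⟩
    exact pv_main_pos ml N hml (by exact_mod_cast hn)
  · have hpg : PySem.List.pyGetD ml (0 : Int) [] = ml.getD 0 [] := PySem.List.pyGetD_zero ml []
    have hL0 : 0 < ml.length := List.length_pos_iff.mpr hml
    have hnil : PySem.List.pyRange 0 ((ml.length : Int) * n) 1 = [] :=
      PySem.List.pyRange_one_eq_nil
        (mul_nonpos_of_nonneg_of_nonpos (by positivity) (by omega))
    have hW0L : (PySem.List.pyGetD ml (0 : Int) []).length = 0 := by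
      rw [hpg]
      cases ml with
      | nil => simp at hml
      | cons a t => simpa using hW0
    simp only [wide_table, wide_table_alt]
    rw [hW0L, hnil]
    simp

-- ===== VERDICT (by name: the statement is the Claim_ definition above) =====
theorem wide_table_spec : Claim_equal_wide_table := by
  intro ml n _ hpre
  unfold Pre_wide_table at hpre
  unfold Spec_wide_table
  exact pv_main ml n hpre.1 hpre.2
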